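-- pv_equiv track=rewrite | github.com/Tamerabdalrazaq/Aroody | analysis.py | generate_tone_approximations
-- ===== SOURCE A (Python) =====
-- import itertools
--
-- def findsubsets(s, n):
--     return list(itertools.combinations(s, n))
--
-- def generate_tone_approximations(beats, displacement):
--     sakanat = []
--     beats_approximations = []
--     for h in range(len(beats)):
--         if (beats[h] == 0):
--             sakanat.append(h)
--
--     for perm in findsubsets(sakanat, displacement):
--         clone = beats.copy()
--         for k in perm:
--             clone[k] = 1
--         beats_approximations.append(clone)
--     return beats_approximations
-- ===== SOURCE B (Python) =====
-- def generate_tone_approximations(beats, displacement):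
--     # Backtracking over the zero positions: choose each next zero index in order,
--     # clone-and-mark when the quota is used up; no itertools.
--     zeros = [i for i, b in enumerate(beats) if b == 0]
--     out = []
--     def rec(start, remaining, chosen):
--         if remaining == 0:
--             clone = beats.copy()
--             for k in chosen:
--                 clone[k] = 1
--             out.append(clone)
--             return
--         for j in range(start, len(zeros) - remaining + 1):
--             rec(j + 1, remaining - 1, chosen + [zeros[j]])
--     if displacement >= 0:
--         rec(0, displacement, [])
--     return out
-- ===== Notes on version B (the rewrite author's own statement) =====
-- stated objective: alternative
-- what changed: B drops itertools: it enumerates the size-displacement subsets of the zero positions by explicit backtracking (start index, remaining quota, chosen accumulator), cloning and marking beats when the quota reaches zero, in the same lexicographic order.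
import Mathlib
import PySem

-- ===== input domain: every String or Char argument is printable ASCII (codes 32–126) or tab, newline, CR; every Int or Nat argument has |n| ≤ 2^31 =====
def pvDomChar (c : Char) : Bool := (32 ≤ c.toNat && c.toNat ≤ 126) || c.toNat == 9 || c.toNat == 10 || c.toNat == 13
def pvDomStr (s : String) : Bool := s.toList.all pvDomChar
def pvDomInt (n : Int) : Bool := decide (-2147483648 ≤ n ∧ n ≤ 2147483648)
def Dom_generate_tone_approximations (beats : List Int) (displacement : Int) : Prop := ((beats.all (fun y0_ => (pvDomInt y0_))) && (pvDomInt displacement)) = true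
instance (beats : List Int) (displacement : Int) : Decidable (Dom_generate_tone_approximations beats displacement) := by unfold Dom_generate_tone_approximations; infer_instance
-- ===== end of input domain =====

-- B replaces itertools.combinations by explicit backtracking over the zero positions (different decomposition, same cost); equivalence on displacement ≥ 0 (Python A raises ValueError for negative displacement).

-- ===== PORT A =====
-- itertools.combinations s n in lexicographic order (A calls it through findsubsets);
-- for n < 0 Python raises (excluded by Pre_), this returns [].
def pvCombs (l : List Nat) (n : Int) : List (List Nat) :=
  if n = 0 then [[]]
  else
    match l with
    | [] => []
    | x :: xs => (pvCombs xs (n - 1)).map (fun c => x :: c) ++ pvCombs xs n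

def generate_tone_approximations (beats : List Int) (displacement : Int) : List (List Int) :=
  -- first loop: collect indices of zeros (h is always in range, so getD's default is never used)
  let sakanat := (List.range beats.length).foldl
    (fun s h => if beats.getD h 0 = 0 then s ++ [h] else s) ([] : List Nat)
  -- second loop: for each combination, clone beats and set the chosen indices to 1
  (pvCombs sakanat displacement).foldl
    (fun acc perm => acc ++ [perm.foldl (fun clone k => clone.set k 1) beats]) []

-- ===== PORT B =====
-- backtracking over the zero positions: choose the next zero index in order,
-- clone-and-mark when the quota is used up (remaining is a Nat: the wrapper's
-- displacement >= 0 guard makes displacement.toNat exact)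
def bRec (beats : List Int) (zeros : List Nat) : Nat → Nat → List Nat → List (List Int) → List (List Int)
  | _start, 0, chosen, out =>
      out ++ [chosen.foldl (fun clone k => clone.set k 1) beats]
  | start, r + 1, chosen, out =>
      (PySem.List.pyRange (start : Int) ((zeros.length : Int) - (r + 1) + 1) 1).foldl
        (fun acc j => bRec beats zeros (j.toNat + 1) r (chosen ++ [zeros.getD j.toNat 0]) acc) out

def generate_tone_approximations_alt (beats : List Int) (displacement : Int) : List (List Int) :=
  let zeros : List Nat := (beats.zipIdx.filter (fun p => p.1 = 0)).map (·.2)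
  if 0 ≤ displacement then bRec beats zeros 0 displacement.toNat [] [] else []

-- ===== PRECONDITION & SPEC =====
-- Pre_ excludes displacement < 0, on which Python A raises ValueError (itertools.combinations rejects negative r).
def Pre_generate_tone_approximations (beats : List Int) (displacement : Int) : Prop :=
  0 ≤ displacement
instance (beats : List Int) (displacement : Int) : Decidable (Pre_generate_tone_approximations beats displacement) := by unfold Pre_generate_tone_approximations; infer_instance

def pvWitness_generate_tone_approximations : List Int × Int := ([0, 1, 0], 1)

def Spec_generate_tone_approximations (beats : List Int) (displacement : Int) (out : List (List Int)) : Prop := out = generate_tone_approximations_alt beats displacement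
instance (beats : List Int) (displacement : Int) (out : List (List Int)) : Decidable (Spec_generate_tone_approximations beats displacement out) := by unfold Spec_generate_tone_approximations; infer_instance

-- ===== CLAIM (what is proved, stated in full; the proofs are below) =====
def Claim_equal_generate_tone_approximations : Prop := ∀ (beats : List Int) (displacement : Int), Dom_generate_tone_approximations beats displacement → Pre_generate_tone_approximations beats displacement → Spec_generate_tone_approximations beats displacement (generate_tone_approximations beats displacement)

-- ===== LEMMAS AND PROOFS =====

-- structural description of A's first loop: the indices of zeros in l
def zerosIdx : List Int → List Nat
  | [] => []
  | b :: rest => (if b = 0 then [0] else []) ++ (zerosIdx rest).map (· + 1)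

lemma foldl_append_ite {g : Nat → Prop} [DecidablePred g] :
    ∀ (rng : List Nat) (init : List Nat),
      rng.foldl (fun s h => if g h then s ++ [h] else s) init
        = init ++ rng.filter (fun h => decide (g h)) := by
  intro rng
  induction rng with
  | nil => intro init; simp
  | cons x xs ih =>
    intro init
    by_cases hx : g x <;> simp [List.foldl_cons, hx, ih]

lemma filter_range_zeros :
    ∀ (l : List Int),
      (List.range l.length).filter (fun h => decide (l.getD h 0 = 0)) = zerosIdx l := by
  intro l
  induction l with
  | nil => simp [zerosIdx]
  | cons b rest ih =>
    have h1 : List.range (rest.length + 1) = 0 :: (List.range rest.length).map (· + 1) := by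
      rw [List.range_succ_eq_map]
    have h2 : List.filter ((fun h => decide ((b :: rest)[h]?.getD 0 = 0)) ∘ fun x => x + 1)
        (List.range rest.length)
        = List.filter (fun h => decide (rest[h]?.getD 0 = 0)) (List.range rest.length) := by
      apply List.filter_congr
      intro x _
      simp
    by_cases hb : b = 0
    · subst hb
      simp [zerosIdx, h1, List.filter_map, ← ih, h2]
    · simp [zerosIdx, h1, hb, List.filter_map, ← ih, h2]

lemma pvCombs_cons (x : Nat) (xs : List Nat) (n : Int) (hn : n ≠ 0) :
    pvCombs (x :: xs) n = (pvCombs xs (n - 1)).map (fun c => x :: c) ++ pvCombs xs n := by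
  simp [pvCombs, hn]

lemma foldl_snoc_map {α β : Type} (f : α → β) :
    ∀ (xs : List α) (acc : List β),
      xs.foldl (fun a p => a ++ [f p]) acc = acc ++ xs.map f := by
  intro xs
  induction xs with
  | nil => intro acc; simp
  | cons x xs ih => intro acc; simp [List.foldl_cons, ih]

lemma pyRange_one_nil {a b : Int} (h : b ≤ a) : PySem.List.pyRange a b 1 = [] := by
  rw [PySem.List.pyRange_one]
  simp [Int.toNat_of_nonpos (by omega : b - a ≤ 0)]

lemma pvCombs_short : ∀ (l : List Nat) (n : Int), (l.length : Int) < n → pvCombs l n = [] := by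
  intro l
  induction l with
  | nil =>
    intro n hn
    rw [pvCombs.eq_def]
    simp only [if_neg (by omega : n ≠ 0)]
  | cons x xs ih =>
    intro n hn
    rw [pvCombs.eq_def]
    simp only [if_neg (by omega : n ≠ 0)]
    simp only [List.length_cons] at hn
    rw [ih (n - 1) (by push_cast; omega), ih n (by push_cast; omega)]
    simp

lemma zipIdx_filter_zeros :
    ∀ (l : List Int) (s : Nat),
      (((l.zipIdx s).filter (fun p => p.1 = 0)).map (·.2)) = (zerosIdx l).map (· + s) := by
  intro l
  induction l with
  | nil => intro s; simp [zerosIdx]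
  | cons b rest ih =>
    intro s
    by_cases hb : b = 0 <;>
      simp [List.zipIdx_cons, List.filter_cons, hb, zerosIdx, ih (s + 1), List.map_map,
        Function.comp, Nat.add_comm, Nat.add_assoc, Nat.add_left_comm]

lemma bRec_eq (beats : List Int) (zeros : List Nat) :
    ∀ (r : Nat) (start : Nat) (chosen : List Nat) (out : List (List Int)),
      bRec beats zeros start r chosen out
        = out ++ (pvCombs (zeros.drop start) (r : Int)).map
            (fun c => (chosen ++ c).foldl (fun clone k => clone.set k 1) beats) := by
  intro r
  induction r with
  | zero =>
    intro start chosen out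
    rw [bRec, pvCombs.eq_def]
    simp
  | succ r ih =>
    have inner : ∀ (m : Nat) (start : Nat), zeros.length - start ≤ m →
        ∀ (chosen : List Nat) (out : List (List Int)),
          bRec beats zeros start (r + 1) chosen out
            = out ++ (pvCombs (zeros.drop start) ((r : Int) + 1)).map
                (fun c => (chosen ++ c).foldl (fun clone k => clone.set k 1) beats) := by
      intro m
      induction m with
      | zero =>
        intro start hs chosen out
        rw [bRec, pyRange_one_nil (by omega : ((zeros.length : Int) - (r + 1) + 1) ≤ start),
          pvCombs_short _ _ (by simp [List.length_drop]; push_cast; omega)]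
        simp
      | succ m ihm =>
        intro start hs chosen out
        by_cases hlt : (start : Int) < (zeros.length : Int) - (r + 1) + 1
        · have hsl : start < zeros.length := by omega
          rw [bRec, PySem.List.pyRange_one_cons hlt, List.foldl_cons]
          have hdrop : zeros.drop start = zeros[start] :: zeros.drop (start + 1) :=
            (List.drop_eq_getElem_cons hsl).symm ▸ rfl
          have step1 : bRec beats zeros ((start : Int).toNat + 1) r
              (chosen ++ [zeros.getD (start : Int).toNat 0]) out
              = out ++ (pvCombs (zeros.drop (start + 1)) (r : Int)).map
                  (fun c => ((chosen ++ [zeros[start]]) ++ c).foldl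
                    (fun clone k => clone.set k 1) beats) := by
            rw [Int.toNat_natCast, ih, List.getD_eq_getElem _ _ hsl]
          rw [step1]
          have loop_eq : (PySem.List.pyRange ((start : Int) + 1) ((zeros.length : Int) - (r + 1) + 1) 1).foldl
              (fun acc j => bRec beats zeros (j.toNat + 1) r (chosen ++ [zeros.getD j.toNat 0]) acc)
              (out ++ (pvCombs (zeros.drop (start + 1)) (r : Int)).map
                  (fun c => ((chosen ++ [zeros[start]]) ++ c).foldl
                    (fun clone k => clone.set k 1) beats))
              = bRec beats zeros (start + 1) (r + 1) chosen
                  (out ++ (pvCombs (zeros.drop (start + 1)) (r : Int)).map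
                    (fun c => ((chosen ++ [zeros[start]]) ++ c).foldl
                      (fun clone k => clone.set k 1) beats)) := by
            rw [bRec]
            push_cast
            rfl
          rw [loop_eq, ihm (start + 1) (by omega), hdrop,
            pvCombs_cons _ _ _ (by omega : ((r : Int) + 1) ≠ 0),
            show ((r : Int) + 1 - 1) = (r : Int) from by ring]
          simp [List.map_append, List.map_map, List.append_assoc, Function.comp]
        · rw [bRec, pyRange_one_nil (by omega),
            pvCombs_short _ _ (by simp [List.length_drop]; push_cast; omega)]
          simp
    exact fun start => inner (zeros.length - start) start le_rfl

-- ===== VERDICT (by name: the statement is the Claim_ definition above) =====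
theorem generate_tone_approximations_spec : Claim_equal_generate_tone_approximations := by
  intro beats displacement _ hpre
  unfold Spec_generate_tone_approximations generate_tone_approximations
    generate_tone_approximations_alt
  have hd : (0 : Int) ≤ displacement := hpre
  simp only [foldl_append_ite, List.nil_append, filter_range_zeros, foldl_snoc_map,
    if_pos hd]
  rw [bRec_eq, zipIdx_filter_zeros, Int.toNat_of_nonneg hd]
  simp
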